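-- pv_equiv track=rewrite | github.com/ram677/gfg_pod | number_of_bst_from_array.py | countBSTs
-- ===== SOURCE A (Python) =====
-- from typing import List
--
-- def countBSTs(arr: List[int]) -> List[int]:
--     # Pre-calculated Catalan numbers: C_n is the number of BSTs with n nodes.
--     # Since arr size is at most 6, the max subtree size is 5.
--     catalan = [1, 1, 2, 5, 14, 42, 132]
--
--     n = len(arr)
--     result = []
--
--     # Iterate through each element, treating it as a potential root.
--     for i in range(n):
--         root_val = arr[i]
--
--         left_count = 0
--         right_count = 0
--
--         # Partition the array based on the chosen root.
--         for j in range(n):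
--             if arr[j] < root_val:
--                 left_count += 1
--             elif arr[j] > root_val:
--                 right_count += 1
--
--         # The number of ways to form the left subtree is C_{left_count}.
--         num_left_subtrees = catalan[left_count]
--
--         # The number of ways to form the right subtree is C_{right_count}.
--         num_right_subtrees = catalan[right_count]
--
--         # The total number of BSTs is the product of the possibilities.
--         total_bsts = num_left_subtrees * num_right_subtrees
--         result.append(total_bsts)
--
--     return result
-- ===== SOURCE B (Python) =====
-- from typing import List
--
-- def countBSTs(arr: List[int]) -> List[int]:
--     catalan = [1, 1, 2, 5, 14, 42, 132]
--     n = len(arr)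
--     s = sorted(arr)
--
--     def bisect_left(a, x):
--         lo, hi = 0, len(a)
--         while lo < hi:
--             mid = (lo + hi) // 2
--             if a[mid] < x:
--                 lo = mid + 1
--             else:
--                 hi = mid
--         return lo
--
--     def bisect_right(a, x):
--         lo, hi = 0, len(a)
--         while lo < hi:
--             mid = (lo + hi) // 2
--             if x < a[mid]:
--                 hi = mid
--             else:
--                 lo = mid + 1
--         return lo
--
--     return [catalan[bisect_left(s, x)] * catalan[n - bisect_right(s, x)] for x in arr]
-- ===== Notes on version B (the rewrite author's own statement) =====
-- stated objective: faster
-- what changed: B sorts the array once and gets each element's strictly-smaller/strictly-larger counts via hand-written bisect_left / len - bisect_right binary searches on the sorted copy, replacing A's per-element linear rescan of the whole array.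
import Mathlib
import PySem

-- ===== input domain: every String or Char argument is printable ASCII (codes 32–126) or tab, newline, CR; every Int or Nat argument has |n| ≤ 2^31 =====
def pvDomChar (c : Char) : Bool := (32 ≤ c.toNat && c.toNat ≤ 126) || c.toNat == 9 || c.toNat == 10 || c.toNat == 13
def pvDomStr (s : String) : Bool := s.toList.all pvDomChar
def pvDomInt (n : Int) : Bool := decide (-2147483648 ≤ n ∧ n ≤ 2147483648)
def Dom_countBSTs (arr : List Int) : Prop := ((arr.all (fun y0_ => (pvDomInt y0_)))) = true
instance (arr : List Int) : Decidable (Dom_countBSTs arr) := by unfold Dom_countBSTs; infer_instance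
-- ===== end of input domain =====

-- B sorts the array once and finds each element's strict-lower/strict-upper counts by binary search
-- (hand-written bisect loops) instead of A's per-element linear rescan.


-- ===== PORT A =====
def countBSTs (arr : List Int) : List Int :=
  let catalan : List Int := [1, 1, 2, 5, 14, 42, 132]
  let n := arr.length
  (PySem.List.pyRange 0 n 1).foldl (fun result i =>
    let rootVal := PySem.List.pyGetD arr i 0
    let counts := (PySem.List.pyRange 0 n 1).foldl (fun (p : Int × Int) j =>
      let v := PySem.List.pyGetD arr j 0
      if v < rootVal then (p.1 + 1, p.2)
      else if v > rootVal then (p.1, p.2 + 1)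
      else p) (0, 0)
    let numLeft := PySem.List.pyGetD catalan counts.1 0
    let numRight := PySem.List.pyGetD catalan counts.2 0
    result ++ [numLeft * numRight]) []

-- ===== PORT B =====
-- hand-written bisect_left loop of Source B (lo/hi halving; a[mid] is always in range when called with hi ≤ len a)
def blLoop (a : List Int) (x : Int) (lo hi : Nat) : Nat :=
  if _h : lo < hi then
    let mid := (lo + hi) / 2
    if PySem.List.pyGetD a (mid : Int) 0 < x then blLoop a x (mid + 1) hi
    else blLoop a x lo mid
  else lo
termination_by hi - lo
decreasing_by all_goals omega

-- hand-written bisect_right loop of Source B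
def brLoop (a : List Int) (x : Int) (lo hi : Nat) : Nat :=
  if _h : lo < hi then
    let mid := (lo + hi) / 2
    if x < PySem.List.pyGetD a (mid : Int) 0 then brLoop a x lo mid
    else brLoop a x (mid + 1) hi
  else lo
termination_by hi - lo
decreasing_by all_goals omega

def countBSTs_alt (arr : List Int) : List Int :=
  let catalan : List Int := [1, 1, 2, 5, 14, 42, 132]
  let n := arr.length
  let s := PySem.List.sorted arr (fun y => y) false
  arr.map (fun x =>
    PySem.List.pyGetD catalan ((blLoop s x 0 s.length : Nat) : Int) 0 *
    PySem.List.pyGetD catalan ((n - brLoop s x 0 s.length : Nat) : Int) 0)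

-- ===== PRECONDITION & SPEC =====
-- Pre_ excludes exactly the inputs on which Python A raises IndexError at catalan[...]: some element
-- has more than 6 strictly-smaller or more than 6 strictly-larger elements (B raises there too).
def Pre_countBSTs (arr : List Int) : Prop :=
  ∀ x ∈ arr, arr.countP (fun y => decide (y < x)) ≤ 6 ∧ arr.countP (fun y => decide (x < y)) ≤ 6
instance (arr : List Int) : Decidable (Pre_countBSTs arr) := by unfold Pre_countBSTs; infer_instance
def pvWitness_countBSTs : List Int := [2, 1, 3]

def Spec_countBSTs (arr : List Int) (out : List Int) : Prop := out = countBSTs_alt arr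
instance (arr : List Int) (out : List Int) : Decidable (Spec_countBSTs arr out) := by unfold Spec_countBSTs; infer_instance

-- ===== CLAIM (what is proved, stated in full; the proofs are below) =====
def Claim_equal_countBSTs : Prop := ∀ (arr : List Int), Dom_countBSTs arr → Pre_countBSTs arr → Spec_countBSTs arr (countBSTs arr)

-- ===== LEMMAS AND PROOFS =====

-- if the indices below r satisfy p and the indices from r on refute p, then countP p = r
lemma countP_eq_of_prefix (a : List Int) (p : Int → Bool) (r : Nat) (hr : r ≤ a.length)
    (h1 : ∀ j (h : j < a.length), j < r → p a[j] = true)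
    (h2 : ∀ j (h : j < a.length), r ≤ j → p a[j] = false) :
    a.countP p = r := by
  have hsplit : a = a.take r ++ a.drop r := (List.take_append_drop r a).symm
  rw [hsplit, List.countP_append]
  have ht : (a.take r).countP p = (a.take r).length := by
    rw [List.countP_eq_length]
    intro y hy
    obtain ⟨i, hi, hget⟩ := List.mem_iff_getElem.mp hy
    have hi2 : i < r ∧ i < a.length := by simpa using hi
    have : (a.take r)[i] = a[i] := List.getElem_take
    rw [← hget, this]
    exact h1 i hi2.2 hi2.1
  have hd : (a.drop r).countP p = 0 := by
    rw [List.countP_eq_zero]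
    intro y hy
    obtain ⟨i, hi, hget⟩ := List.mem_iff_getElem.mp hy
    have hi' : r + i < a.length := by simpa [Nat.lt_sub_iff_add_lt'] using hi
    have : (a.drop r)[i] = a[r + i] := List.getElem_drop
    rw [← hget, this]
    simp [h2 (r + i) hi' (Nat.le_add_right _ _)]
  rw [ht, hd, List.length_take]
  omega

-- the complementary split: prefix refutes p, suffix satisfies it
lemma countP_eq_of_suffix (a : List Int) (p : Int → Bool) (r : Nat)
    (h1 : ∀ j (h : j < a.length), j < r → p a[j] = false)
    (h2 : ∀ j (h : j < a.length), r ≤ j → p a[j] = true) :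
    a.countP p = a.length - r := by
  have hsplit : a = a.take r ++ a.drop r := (List.take_append_drop r a).symm
  rw [hsplit, List.countP_append]
  have ht : (a.take r).countP p = 0 := by
    rw [List.countP_eq_zero]
    intro y hy
    obtain ⟨i, hi, hget⟩ := List.mem_iff_getElem.mp hy
    have hi2 : i < r ∧ i < a.length := by simpa using hi
    have : (a.take r)[i] = a[i] := List.getElem_take
    rw [← hget, this]
    simp [h1 i hi2.2 hi2.1]
  have hd : (a.drop r).countP p = (a.drop r).length := by
    rw [List.countP_eq_length]
    intro y hy
    obtain ⟨i, hi, hget⟩ := List.mem_iff_getElem.mp hy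
    have hi' : r + i < a.length := by simpa [Nat.lt_sub_iff_add_lt'] using hi
    have : (a.drop r)[i] = a[r + i] := List.getElem_drop
    rw [← hget, this]
    exact h2 (r + i) hi' (Nat.le_add_right _ _)
  rw [ht, hd]
  simp [List.length_drop]

lemma pairwise_le_getElem (a : List Int) (hs : a.Pairwise (· ≤ ·)) (i j : Nat)
    (hij : i ≤ j) (hj : j < a.length) : a[i]'(lt_of_le_of_lt hij hj) ≤ a[j] := by
  rcases Nat.lt_or_eq_of_le hij with h | h
  · exact List.pairwise_iff_getElem.mp hs i j _ hj h
  · subst h; exact le_refl _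

lemma blLoop_char (a : List Int) (x : Int) (hs : a.Pairwise (· ≤ ·)) :
    ∀ k lo hi, hi - lo = k → lo ≤ hi → hi ≤ a.length →
    (∀ j (h : j < a.length), j < lo → a[j] < x) →
    (∀ j (h : j < a.length), hi ≤ j → x ≤ a[j]) →
    blLoop a x lo hi ≤ a.length ∧
    (∀ j (h : j < a.length), j < blLoop a x lo hi → a[j] < x) ∧
    (∀ j (h : j < a.length), blLoop a x lo hi ≤ j → x ≤ a[j]) := by
  intro k
  induction k using Nat.strong_induction_on with
  | _ k ih =>
    intro lo hi hk hlohi hhi H1 H2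
    rw [blLoop]
    split
    · rename_i hlt
      have hmid : (lo + hi) / 2 < a.length := by omega
      have hget : PySem.List.pyGetD a (((lo + hi) / 2 : Nat) : Int) 0 = a[(lo + hi) / 2] := by
        rw [PySem.List.pyGetD_natCast, List.getD_eq_getElem _ _ hmid]
      simp only [hget]
      split
      · rename_i hcmp
        apply ih (hi - ((lo + hi) / 2 + 1)) (by omega) _ _ rfl (by omega) hhi
        · intro j h hj
          calc a[j] ≤ a[(lo + hi) / 2] := pairwise_le_getElem a hs j _ (by omega) hmid
            _ < x := hcmp
        · exact H2
      · rename_i hcmp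
        have hcmp' : x ≤ a[(lo + hi) / 2] := not_lt.mp hcmp
        apply ih ((lo + hi) / 2 - lo) (by omega) _ _ rfl (by omega) (by omega) H1
        intro j h hj
        exact le_trans hcmp' (pairwise_le_getElem a hs _ j hj h)
    · exact ⟨by omega, fun j h hj => H1 j h (by omega), fun j h hj => H2 j h (by omega)⟩

lemma brLoop_char (a : List Int) (x : Int) (hs : a.Pairwise (· ≤ ·)) :
    ∀ k lo hi, hi - lo = k → lo ≤ hi → hi ≤ a.length →
    (∀ j (h : j < a.length), j < lo → a[j] ≤ x) →
    (∀ j (h : j < a.length), hi ≤ j → x < a[j]) →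
    brLoop a x lo hi ≤ a.length ∧
    (∀ j (h : j < a.length), j < brLoop a x lo hi → a[j] ≤ x) ∧
    (∀ j (h : j < a.length), brLoop a x lo hi ≤ j → x < a[j]) := by
  intro k
  induction k using Nat.strong_induction_on with
  | _ k ih =>
    intro lo hi hk hlohi hhi H1 H2
    rw [brLoop]
    split
    · rename_i hlt
      have hmid : (lo + hi) / 2 < a.length := by omega
      have hget : PySem.List.pyGetD a (((lo + hi) / 2 : Nat) : Int) 0 = a[(lo + hi) / 2] := by
        rw [PySem.List.pyGetD_natCast, List.getD_eq_getElem _ _ hmid]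
      simp only [hget]
      split
      · rename_i hcmp
        apply ih ((lo + hi) / 2 - lo) (by omega) _ _ rfl (by omega) (by omega) H1
        intro j h hj
        exact lt_of_lt_of_le hcmp (pairwise_le_getElem a hs _ j hj h)
      · rename_i hcmp
        have hcmp' : a[(lo + hi) / 2] ≤ x := not_lt.mp hcmp
        apply ih (hi - ((lo + hi) / 2 + 1)) (by omega) _ _ rfl (by omega) hhi
        · intro j h hj
          exact le_trans (pairwise_le_getElem a hs j _ (by omega) hmid) hcmp'
        · exact H2
    · exact ⟨by omega, fun j h hj => H1 j h (by omega), fun j h hj => H2 j h (by omega)⟩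

lemma blLoop_count (arr : List Int) (x : Int) :
    blLoop (PySem.List.sorted arr (fun y => y) false) x 0 (PySem.List.sorted arr (fun y => y) false).length
      = arr.countP (fun y => decide (y < x)) := by
  set s := PySem.List.sorted arr (fun y => y) false with hsdef
  have hs : s.Pairwise (· ≤ ·) := by simpa using PySem.List.sorted_pairwise arr (fun y => y)
  obtain ⟨hle, hpre, hsuf⟩ := blLoop_char s x hs s.length 0 s.length (by omega) (by omega) le_rfl
    (fun j h hj => absurd hj (by omega)) (fun j h hj => absurd h (by omega))
  rw [← (PySem.List.sorted_perm arr (fun y => y) false).countP_eq]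
  exact (countP_eq_of_prefix s (fun y => decide (y < x)) _ hle
    (fun j h hj => by simpa using hpre j h hj)
    (fun j h hj => by simpa using hsuf j h hj)).symm

lemma brLoop_count (arr : List Int) (x : Int) :
    arr.length - brLoop (PySem.List.sorted arr (fun y => y) false) x 0 (PySem.List.sorted arr (fun y => y) false).length
      = arr.countP (fun y => decide (x < y)) := by
  set s := PySem.List.sorted arr (fun y => y) false with hsdef
  have hs : s.Pairwise (· ≤ ·) := by simpa using PySem.List.sorted_pairwise arr (fun y => y)
  have hlen : s.length = arr.length := (PySem.List.sorted_perm arr (fun y => y) false).length_eq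
  obtain ⟨hle, hpre, hsuf⟩ := brLoop_char s x hs s.length 0 s.length (by omega) (by omega) le_rfl
    (fun j h hj => absurd hj (by omega)) (fun j h hj => absurd h (by omega))
  rw [← (PySem.List.sorted_perm arr (fun y => y) false).countP_eq]
  rw [countP_eq_of_suffix s (fun y => decide (x < y)) (brLoop s x 0 s.length)
    (fun j h hj => by simpa using not_lt.mpr (hpre j h hj))
    (fun j h hj => by simpa using hsuf j h hj)]
  rw [hlen]

lemma inner_counts (arr : List Int) (root : Int) :
    (PySem.List.pyRange 0 arr.length 1).foldl (fun (p : Int × Int) j =>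
      let v := PySem.List.pyGetD arr j 0
      if v < root then (p.1 + 1, p.2)
      else if v > root then (p.1, p.2 + 1)
      else p) (0, 0)
    = ((arr.countP (fun y => decide (y < root)) : Int), (arr.countP (fun y => decide (root < y)) : Int)) := by
  have h := PySem.List.foldl_pyRange_zero_pyGetD arr 0
    (fun (p : Int × Int) v =>
      if v < root then (p.1 + 1, p.2)
      else if v > root then (p.1, p.2 + 1)
      else p) ((0, 0) : Int × Int)
  rw [show (arr.length : Int) = PySem.List.len arr from (PySem.List.len_eq arr).symm]
  rw [h]
  have hc : arr.foldl (fun (p : Int × Int) v =>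
      if v < root then (p.1 + 1, p.2)
      else if v > root then (p.1, p.2 + 1)
      else p) (0, 0)
    = arr.foldl (fun (p : Int × Int) v =>
      ((if decide (v < root) then p.1 + 1 else p.1), (if decide (root < v) then p.2 + 1 else p.2))) (0, 0) := by
    apply PySem.List.foldl_congr_mem
    intro acc v _
    by_cases h1 : v < root
    · simp [h1, not_lt.mpr (le_of_lt h1)]
    · by_cases h2 : root < v <;> simp [h1, h2]
  rw [hc, PySem.List.foldl_prod_mk
    (f := fun (s : Int) v => if decide (v < root) then s + 1 else s)
    (g := fun (s : Int) v => if decide (root < v) then s + 1 else s)]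
  rw [PySem.List.foldl_count_if (fun y => decide (y < root)) arr 0,
      PySem.List.foldl_count_if (fun y => decide (root < y)) arr 0]
  simp

lemma countBSTs_eq_map (arr : List Int) :
    countBSTs arr = arr.map (fun x =>
      PySem.List.pyGetD [1, 1, 2, 5, 14, 42, 132] ((arr.countP (fun y => decide (y < x)) : Nat) : Int) 0 *
      PySem.List.pyGetD [1, 1, 2, 5, 14, 42, 132] ((arr.countP (fun y => decide (x < y)) : Nat) : Int) 0) := by
  unfold countBSTs
  simp only []
  rw [show (arr.length : Int) = PySem.List.len arr from (PySem.List.len_eq arr).symm]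
  rw [PySem.List.foldl_pyRange_zero_pyGetD arr 0
    (fun (result : List Int) root =>
      result ++ [PySem.List.pyGetD [1, 1, 2, 5, 14, 42, 132]
          ((PySem.List.pyRange 0 (PySem.List.len arr) 1).foldl (fun (p : Int × Int) j =>
            let v := PySem.List.pyGetD arr j 0
            if v < root then (p.1 + 1, p.2)
            else if v > root then (p.1, p.2 + 1)
            else p) (0, 0)).1 0 *
        PySem.List.pyGetD [1, 1, 2, 5, 14, 42, 132]
          ((PySem.List.pyRange 0 (PySem.List.len arr) 1).foldl (fun (p : Int × Int) j =>
            let v := PySem.List.pyGetD arr j 0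
            if v < root then (p.1 + 1, p.2)
            else if v > root then (p.1, p.2 + 1)
            else p) (0, 0)).2 0]) ([] : List Int)]
  rw [PySem.List.foldl_append_singleton_eq_map]
  simp only [List.nil_append]
  apply List.map_congr_left
  intro x _
  rw [show PySem.List.len arr = (arr.length : Int) from PySem.List.len_eq arr, inner_counts arr x]

-- ===== VERDICT (by name: the statement is the Claim_ definition above) =====
theorem countBSTs_spec : Claim_equal_countBSTs := by
  intro arr _ _
  unfold Spec_countBSTs countBSTs_alt
  rw [countBSTs_eq_map]
  simp only []
  apply List.map_congr_left
  intro x _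
  rw [blLoop_count, brLoop_count]
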